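-- pv_equiv track=rewrite | github.com/S3dMJ/Binary-Relations | RelationsProject.py | input2set
-- ===== SOURCE A (Python) =====
-- def input2set(A, Rsize, raw):
--     Rset = []
--     counter = 2
--     j = 0
--     for i in range(Rsize):
--         Rset.append([0, 0])
--
--     for i in range(len(raw)):
--         if raw[i] in A and counter % 2 == 0 and j < Rsize:
--             Rset[j][0] = raw[i]
--             counter = counter + 1
--         elif raw[i] in A and counter % 2 != 0 and j < Rsize:
--             Rset[j][1] = raw[i]
--             counter = counter + 1
--             j = j + 1
--
--     return Rset
-- ===== SOURCE B (Python) =====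
-- def input2set(A, Rsize, raw):
--     # Two-pass: filter first, then place by index arithmetic (same return value as A).
--     filtered = [x for x in raw if x in A]
--     n = Rsize if Rsize > 0 else 0
--     Rset = [[0, 0] for _ in range(n)]
--     for idx, v in enumerate(filtered[:2 * n]):
--         Rset[idx // 2][idx % 2] = v
--     return Rset
-- ===== Notes on version B (the rewrite author's own statement) =====
-- stated objective: simpler
-- what changed: A's single stateful pass with a counter-parity/j state machine is replaced by a filter pass followed by direct placement of the i-th kept element into row i//2, slot i%2.
import Mathlib
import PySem

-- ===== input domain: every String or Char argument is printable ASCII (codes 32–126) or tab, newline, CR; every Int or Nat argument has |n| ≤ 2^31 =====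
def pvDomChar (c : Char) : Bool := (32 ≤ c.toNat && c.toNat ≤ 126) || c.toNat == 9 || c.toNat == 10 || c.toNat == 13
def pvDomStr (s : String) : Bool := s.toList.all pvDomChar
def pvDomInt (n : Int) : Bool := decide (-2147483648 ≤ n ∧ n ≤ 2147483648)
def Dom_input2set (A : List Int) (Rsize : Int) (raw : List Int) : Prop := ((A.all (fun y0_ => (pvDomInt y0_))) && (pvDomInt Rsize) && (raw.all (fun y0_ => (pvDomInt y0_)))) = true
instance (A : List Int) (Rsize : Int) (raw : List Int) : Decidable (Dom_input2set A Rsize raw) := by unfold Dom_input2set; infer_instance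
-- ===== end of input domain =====

-- B replaces A's one-pass counter/parity state machine by a filter pass plus direct
-- index-arithmetic placement (objective: simpler). Return values proved equal on all inputs.


-- ===== PORT A =====
-- literal transliteration of A: build Rset by appending, then one indexed pass with
-- state (Rset, counter, j); Rset[j][k] = v is ported as a functional list update.
def input2set (A : List Int) (Rsize : Int) (raw : List Int) : List (List Int) :=
  let Rset := (PySem.List.pyRange 0 Rsize).foldl (fun acc _ => acc ++ [([0, 0] : List Int)]) []
  let st := (PySem.List.pyRange 0 (raw.length : Int)).foldl
    (fun (st : List (List Int) × Int × Int) i =>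
      let v := PySem.List.pyGetD raw i 0
      if A.contains v && (PySem.Int.mod st.2.1 2 == 0) && decide (st.2.2 < Rsize) then
        (st.1.set st.2.2.toNat ((st.1.getD st.2.2.toNat []).set 0 v), st.2.1 + 1, st.2.2)
      else if A.contains v && !(PySem.Int.mod st.2.1 2 == 0) && decide (st.2.2 < Rsize) then
        (st.1.set st.2.2.toNat ((st.1.getD st.2.2.toNat []).set 1 v), st.2.1 + 1, st.2.2 + 1)
      else st)
    (Rset, 2, 0)
  st.1

-- ===== PORT B =====
-- transliteration of Source B: filter, blank rows, then place filtered[idx] at [idx//2][idx%2].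
def input2set_alt (A : List Int) (Rsize : Int) (raw : List Int) : List (List Int) :=
  let filtered := raw.filter (fun x => A.contains x)
  let n : Int := if Rsize > 0 then Rsize else 0
  let Rset := (PySem.List.pyRange 0 n).map (fun _ => ([0, 0] : List Int))
  (PySem.List.enumerate (PySem.List.slice filtered none (some (2 * n)))).foldl
    (fun R p =>
      let q := (PySem.Int.floordiv p.1 2).toNat
      R.set q ((R.getD q []).set (PySem.Int.mod p.1 2).toNat p.2))
    Rset

-- ===== PRECONDITION & SPEC =====
def Spec_input2set (A : List Int) (Rsize : Int) (raw : List Int) (out : List (List Int)) : Prop := out = input2set_alt A Rsize raw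
instance (A : List Int) (Rsize : Int) (raw : List Int) (out : List (List Int)) : Decidable (Spec_input2set A Rsize raw out) := by unfold Spec_input2set; infer_instance

-- ===== CLAIM (what is proved, stated in full; the proofs are below) =====
def Claim_equal_input2set : Prop := ∀ (A : List Int) (Rsize : Int) (raw : List Int), Dom_input2set A Rsize raw → Spec_input2set A Rsize raw (input2set A Rsize raw)

-- ===== LEMMAS AND PROOFS =====

-- A's loop body on one element (named for the proofs; definitionally the body of input2set's fold)
def stepA (A : List Int) (Rsize : Int) (st : List (List Int) × Int × Int) (v : Int) :
    List (List Int) × Int × Int :=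
  if A.contains v && (PySem.Int.mod st.2.1 2 == 0) && decide (st.2.2 < Rsize) then
    (st.1.set st.2.2.toNat ((st.1.getD st.2.2.toNat []).set 0 v), st.2.1 + 1, st.2.2)
  else if A.contains v && !(PySem.Int.mod st.2.1 2 == 0) && decide (st.2.2 < Rsize) then
    (st.1.set st.2.2.toNat ((st.1.getD st.2.2.toNat []).set 1 v), st.2.1 + 1, st.2.2 + 1)
  else st

-- B's loop body (definitionally the body of input2set_alt's fold)
def stepB (R : List (List Int)) (p : Int × Int) : List (List Int) :=
  R.set (PySem.Int.floordiv p.1 2).toNat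
    ((R.getD (PySem.Int.floordiv p.1 2).toNat []).set (PySem.Int.mod p.1 2).toNat p.2)

-- the number of rows, as a Nat
def nNat (Rsize : Int) : Nat := if 0 < Rsize then Rsize.toNat else 0

lemma A_eq_fold (A : List Int) (Rsize : Int) (raw : List Int) :
    input2set A Rsize raw =
      (raw.foldl (stepA A Rsize)
        ((PySem.List.pyRange 0 Rsize).map (fun _ => ([0, 0] : List Int)), 2, 0)).1 := by
  simp only [input2set, PySem.List.foldl_append_singleton_eq_map, List.nil_append]
  exact congrArg Prod.fst (PySem.List.foldl_pyRange_pyGetD' raw 0 (stepA A Rsize) _ le_rfl)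

lemma alt_eq_fold (A : List Int) (Rsize : Int) (raw : List Int) :
    input2set_alt A Rsize raw =
      (PySem.List.enumerate
          ((raw.filter (fun x => A.contains x)).take (2 * nNat Rsize))).foldl stepB
        ((PySem.List.pyRange 0 (if Rsize > 0 then Rsize else 0)).map
          (fun _ => ([0, 0] : List Int))) := by
  have hs : PySem.List.slice (raw.filter fun x => A.contains x) none
      (some (2 * (if Rsize > 0 then Rsize else 0))) =
      List.take (2 * nNat Rsize) (raw.filter fun x => A.contains x) := by
    rw [PySem.List.slice_to _ (by split_ifs <;> omega : (0:Int) ≤ 2 * (if Rsize > 0 then Rsize else 0))]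
    congr 1
    unfold nNat; split_ifs <;> omega
  simp only [input2set_alt]
  rw [hs]
  rfl

-- the two blank-row lists coincide (pyRange 0 Rsize is empty for Rsize ≤ 0)
lemma blank_eq (Rsize : Int) :
    (PySem.List.pyRange 0 Rsize).map (fun _ => ([0, 0] : List Int)) =
      (PySem.List.pyRange 0 (if Rsize > 0 then Rsize else 0)).map
        (fun _ => ([0, 0] : List Int)) := by
  split_ifs with h
  · rfl
  · simp [pysem]
    omega

-- one A-step from the invariant state: fires iff the element is kept and the board not full
lemma stepA_at (A : List Int) (Rsize : Int) (n : Nat)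
    (hn : ∀ k : Nat, ((k : Int) < Rsize) ↔ k < n)
    (R : List (List Int)) (c : Nat) (x : Int) :
    stepA A Rsize (R, 2 + (c : Int), ((c / 2 : Nat) : Int)) x =
      if A.contains x = true ∧ c < 2 * n then
        (R.set (c / 2) ((R.getD (c / 2) []).set (c % 2) x), 2 + (c : Int) + 1,
          (((c + 1) / 2 : Nat) : Int))
      else (R, 2 + (c : Int), ((c / 2 : Nat) : Int)) := by
  have hmod : PySem.Int.mod (2 + (c : Int)) 2 = ((c % 2 : Nat) : Int) := by
    rw [PySem.Int.mod_eq_emod_of_pos (by norm_num)]; omega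
  have hdiv := hn (c / 2)
  unfold stepA
  dsimp only
  rw [hmod]
  split_ifs with h1 hP h2 hP hP
  · simp only [Bool.and_eq_true, beq_iff_eq, decide_eq_true_eq] at h1
    obtain ⟨⟨hcx, hpar⟩, hlt⟩ := h1
    rw [show c % 2 = 0 by omega]
    simp only [Int.toNat_natCast]
    rw [show (((c / 2 : Nat) : Int)) = (((c + 1) / 2 : Nat) : Int) by omega]
  · simp only [Bool.and_eq_true, beq_iff_eq, decide_eq_true_eq] at h1
    obtain ⟨⟨hcx, hpar⟩, hlt⟩ := h1
    exact absurd ⟨hcx, by omega⟩ hP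
  · simp only [Bool.and_eq_true, Bool.not_eq_true', beq_eq_false_iff_ne, ne_eq,
      decide_eq_true_eq] at h2
    obtain ⟨⟨hcx, hpar⟩, hlt⟩ := h2
    rw [show c % 2 = 1 by omega]
    simp only [Int.toNat_natCast]
    rw [show (((c / 2 : Nat) : Int)) + 1 = (((c + 1) / 2 : Nat) : Int) by omega]
  · simp only [Bool.and_eq_true, Bool.not_eq_true', beq_eq_false_iff_ne, ne_eq,
      decide_eq_true_eq] at h2
    obtain ⟨⟨hcx, hpar⟩, hlt⟩ := h2
    exact absurd ⟨hcx, by omega⟩ hP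
  · simp only [Bool.and_eq_true, Bool.not_eq_true', beq_eq_false_iff_ne, ne_eq,
      beq_iff_eq, decide_eq_true_eq] at h1 h2
    obtain ⟨hcx, hc⟩ := hP
    by_cases hpar : c % 2 = 0
    · exact absurd ⟨⟨hcx, by omega⟩, by omega⟩ h1
    · exact absurd ⟨⟨hcx, by omega⟩, by omega⟩ h2
  · rfl

-- main invariant: after any prefix of raw, A's state is (B's partial board, 2 + c, c / 2)
-- where c = min (#kept so far) (2 * rows)
lemma loop_eq (A : List Int) (Rsize : Int) (raw : List Int) (R0 : List (List Int)) :
    raw.foldl (stepA A Rsize) (R0, 2, 0) =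
      ((PySem.List.enumerate
          ((raw.filter (fun x => A.contains x)).take (2 * nNat Rsize))).foldl stepB R0,
       2 + ((min (raw.filter (fun x => A.contains x)).length (2 * nNat Rsize) : Nat) : Int),
       (((min (raw.filter (fun x => A.contains x)).length (2 * nNat Rsize)) / 2 : Nat) : Int)) := by
  have hn : ∀ k : Nat, ((k : Int) < Rsize) ↔ k < nNat Rsize := by
    intro k; unfold nNat; split_ifs with h <;> omega
  induction raw using List.reverseRecOn with
  | nil => simp
  | append_singleton l x ih =>
    rw [List.foldl_append, List.foldl_cons, List.foldl_nil, ih, List.filter_append]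
    by_cases hx : A.contains x
    · simp only [List.filter_cons, List.filter_nil, hx, if_pos, List.length_append,
        List.length_cons, List.length_nil, Nat.zero_add]
      by_cases hlen : (l.filter (fun x => A.contains x)).length < 2 * nNat Rsize
      · rw [show min ((l.filter (fun x => A.contains x)).length + 1) (2 * nNat Rsize)
              = min (l.filter (fun x => A.contains x)).length (2 * nNat Rsize) + 1 by omega]
        rw [show min (l.filter (fun x => A.contains x)).length (2 * nNat Rsize)
              = (l.filter (fun x => A.contains x)).length by omega]
        rw [stepA_at A Rsize (nNat Rsize) hn, if_pos ⟨hx, hlen⟩]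
        rw [List.take_append,
          List.take_of_length_le (le_of_lt hlen),
          show List.take (2 * nNat Rsize - (l.filter (fun x => A.contains x)).length) [x] = [x] by
            rcases Nat.exists_eq_add_of_lt hlen with ⟨k, hk⟩
            rw [show 2 * nNat Rsize - (l.filter (fun x => A.contains x)).length = k + 1 by omega]
            simp]
        rw [PySem.List.enumerate_append, List.foldl_append]
        simp only [PySem.List.enumerate_cons, PySem.List.enumerate_nil, List.foldl_cons,
          List.foldl_nil, stepB, Int.zero_add]
        rw [show (PySem.Int.floordiv ((l.filter (fun x => A.contains x)).length : Int) 2).toNat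
              = (l.filter (fun x => A.contains x)).length / 2 by
            rw [PySem.Int.floordiv_eq_ediv_of_pos (by norm_num)]; omega]
        rw [show (PySem.Int.mod ((l.filter (fun x => A.contains x)).length : Int) 2).toNat
              = (l.filter (fun x => A.contains x)).length % 2 by
            rw [PySem.Int.mod_eq_emod_of_pos (by norm_num)]; omega]
        rw [show (2 : Int) + ((l.filter (fun x => A.contains x)).length : Int) + 1
              = 2 + (((l.filter (fun x => A.contains x)).length + 1 : Nat) : Int) by push_cast; ring]
      · rw [stepA_at A Rsize (nNat Rsize) hn, if_neg (fun h => absurd h.2 (by omega))]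
        rw [List.take_append_of_le_length (by omega)]
        rw [show min ((l.filter (fun x => A.contains x)).length + 1) (2 * nNat Rsize)
              = min (l.filter (fun x => A.contains x)).length (2 * nNat Rsize) by omega]
    · simp only [List.filter_cons, List.filter_nil, hx, Bool.false_eq_true, if_false,
        List.append_nil]
      rw [stepA_at A Rsize (nNat Rsize) hn, if_neg (fun h => absurd h.1 hx)]

-- ===== VERDICT (by name: the statement is the Claim_ definition above) =====
theorem input2set_spec : Claim_equal_input2set := by
  intro A Rsize raw _
  unfold Spec_input2set
  rw [A_eq_fold, alt_eq_fold, blank_eq, loop_eq]
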